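-- pv_equiv track=rewrite | github.com/rgdevengineer/Python-Programs-Daily | more-code-practice/parcel_scanning_system.py | scan_parcels
-- ===== SOURCE A (Python) =====
-- def scan_parcels(parcel_codes: list[str]) -> list[str]:
--     scan_messages = []
--     for barcode in parcel_codes:
--         if barcode == "DAMAGED":
--             scan_messages.append("Skipped damaged parcel")
--             continue
--         elif barcode == "STOP":
--             scan_messages.append("Critical error: Stopping scan")
--             break
--         else:
--             scan_messages.append(f"Scanned parcel: {barcode}")
--     else:
--         scan_messages.append("All parcels scanned successfully")
--
--     return scan_messages
-- ===== SOURCE B (Python) =====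
-- def scan_parcels(parcel_codes: list[str]) -> list[str]:
--     try:
--         stop_idx = parcel_codes.index("STOP")
--     except ValueError:
--         stop_idx = None
--     segment = parcel_codes if stop_idx is None else parcel_codes[:stop_idx]
--     messages = [
--         "Skipped damaged parcel" if b == "DAMAGED" else f"Scanned parcel: {b}"
--         for b in segment
--     ]
--     messages.append(
--         "All parcels scanned successfully" if stop_idx is None
--         else "Critical error: Stopping scan"
--     )
--     return messages
-- ===== Notes on version B (the rewrite author's own statement) =====
-- stated objective: alternative
-- what changed: Replaces the single branchy loop with break/for-else by an index-first two-pass shape: find the first 'STOP' via list.index, slice the prefix, map it with a comprehension, then append the final status message.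
import Mathlib
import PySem

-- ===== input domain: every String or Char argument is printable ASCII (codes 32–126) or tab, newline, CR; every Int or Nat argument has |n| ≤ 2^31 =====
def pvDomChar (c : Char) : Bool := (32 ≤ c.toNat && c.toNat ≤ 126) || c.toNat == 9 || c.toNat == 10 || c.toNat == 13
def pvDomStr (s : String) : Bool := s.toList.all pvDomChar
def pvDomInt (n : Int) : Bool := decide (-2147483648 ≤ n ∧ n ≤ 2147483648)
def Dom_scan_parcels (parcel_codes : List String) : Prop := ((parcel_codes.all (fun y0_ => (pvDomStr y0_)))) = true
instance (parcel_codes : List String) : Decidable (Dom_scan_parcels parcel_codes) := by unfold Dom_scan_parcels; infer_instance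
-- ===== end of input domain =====

-- B replaces A's single branchy loop (break / for-else) by an index-first two-pass shape: find the first "STOP", slice the prefix, map messages, append the status line; objective: alternative decomposition, same cost.


-- ===== PORT A =====
-- A: one loop; DAMAGED -> skip message, STOP -> critical message + break, else scanned; for-else appends success.
def scan_parcels (parcel_codes : List String) : List String :=
  match parcel_codes with
  | [] => ["All parcels scanned successfully"]
  | barcode :: rest =>
    if barcode = "DAMAGED" then "Skipped damaged parcel" :: scan_parcels rest
    else if barcode = "STOP" then ["Critical error: Stopping scan"]
    else ("Scanned parcel: " ++ barcode) :: scan_parcels rest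

-- ===== PORT B =====
-- B: index of first "STOP" (none if absent), slice the prefix, map it, append the status line.
def scan_parcels_alt (parcel_codes : List String) : List String :=
  let stop_idx := PySem.List.index? parcel_codes "STOP"
  let segment := match stop_idx with
    | none => parcel_codes
    | some i => parcel_codes.take i   -- parcel_codes[:i], exact since 0 ≤ i
  (segment.map (fun b => if b = "DAMAGED" then "Skipped damaged parcel"
                         else "Scanned parcel: " ++ b)) ++
  [match stop_idx with
   | none => "All parcels scanned successfully"
   | some _ => "Critical error: Stopping scan"]

-- ===== PRECONDITION & SPEC =====
def Spec_scan_parcels (parcel_codes : List String) (out : List String) : Prop := out = scan_parcels_alt parcel_codes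
instance (parcel_codes : List String) (out : List String) : Decidable (Spec_scan_parcels parcel_codes out) := by unfold Spec_scan_parcels; infer_instance

-- ===== CLAIM (what is proved, stated in full; the proofs are below) =====
def Claim_equal_scan_parcels : Prop := ∀ (parcel_codes : List String), Dom_scan_parcels parcel_codes → Spec_scan_parcels parcel_codes (scan_parcels parcel_codes)

-- ===== LEMMAS AND PROOFS =====

-- ===== VERDICT (by name: the statement is the Claim_ definition above) =====
theorem alt_cons_ne (b : String) (rest : List String) (h : b ≠ "STOP") :
    scan_parcels_alt (b :: rest) =
      (if b = "DAMAGED" then "Skipped damaged parcel" else "Scanned parcel: " ++ b)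
        :: scan_parcels_alt rest := by
  have hidx : PySem.List.index? (b :: rest) "STOP" = (PySem.List.index? rest "STOP").map (· + 1) :=
    PySem.List.index?_cons_of_ne rest h
  simp only [scan_parcels_alt, hidx]
  cases PySem.List.index? rest "STOP" <;> simp

theorem scan_parcels_key : ∀ (parcel_codes : List String), scan_parcels parcel_codes = scan_parcels_alt parcel_codes := by
  intro xs
  induction xs with
  | nil => decide
  | cons b rest ih =>
    by_cases hs : b = "STOP"
    · subst hs
      have h0 : PySem.List.index? ("STOP" :: rest) "STOP" = some 0 :=
        PySem.List.index?_cons_self _ _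
      simp only [scan_parcels_alt, h0]
      simp [scan_parcels]
    · rw [alt_cons_ne b rest hs]
      by_cases hd : b = "DAMAGED" <;> simp [scan_parcels, hd, hs, ih]

theorem scan_parcels_spec : Claim_equal_scan_parcels := by
  intro xs _
  unfold Spec_scan_parcels
  exact scan_parcels_key xs
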